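-- pv_equiv track=rewrite | github.com/pypi-data/pypi-mirror-382 | packages/cakemail-api-docs-mcp/cakemail_api_docs_mcp-0.1.2-py3-none-any.whl/cakemail_mcp/errors.py | find_similar_paths
-- ===== SOURCE A (Python) =====
-- def find_similar_paths(target: str, available_paths: list[str], limit: int = 3) -> list[str]:
--     """Find similar paths using simple string matching.
--
--     Args:
--         target: The path that wasn't found
--         available_paths: List of available paths
--         limit: Maximum number of suggestions
--
--     Returns:
--         List of similar paths
--     """
--     # Simple similarity: paths that contain parts of the target or vice versa
--     suggestions = []
--
--     # Normalize paths for comparison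
--     target_parts = set(target.lower().strip("/").split("/"))
--
--     for path in available_paths:
--         path_parts = set(path.lower().strip("/").split("/"))
--
--         # Calculate overlap
--         overlap = len(target_parts & path_parts)
--
--         if overlap > 0:
--             suggestions.append((overlap, path))
--
--     # Sort by overlap (descending) and take top matches
--     suggestions.sort(reverse=True, key=lambda x: x[0])
--     return [path for _, path in suggestions[:limit]]
-- ===== SOURCE B (Python) =====
-- def find_similar_paths(target: str, available_paths: list[str], limit: int = 3) -> list[str]:
--     """Find similar paths using simple string matching (bucket/counting-sort version)."""
--     target_parts = set(target.lower().strip("/").split("/"))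
--     # Bucket each qualifying path under its overlap count, in input order.
--     buckets = {}
--     for path in available_paths:
--         overlap = len(target_parts & set(path.lower().strip("/").split("/")))
--         if overlap > 0:
--             buckets.setdefault(overlap, []).append(path)
--     # Consume buckets from the largest possible overlap down to 1.
--     result = []
--     for k in range(len(target_parts), 0, -1):
--         result.extend(buckets.get(k, []))
--     return result[:limit]
-- ===== Notes on version B (the rewrite author's own statement) =====
-- stated objective: alternative
-- what changed: Replaces the collect-pairs-then-stable-sort pass with a bucket (counting-sort) dict keyed by the overlap count, emitted from the maximum overlap down to 1, which preserves the stable tie order without a comparison sort.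
import Mathlib
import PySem

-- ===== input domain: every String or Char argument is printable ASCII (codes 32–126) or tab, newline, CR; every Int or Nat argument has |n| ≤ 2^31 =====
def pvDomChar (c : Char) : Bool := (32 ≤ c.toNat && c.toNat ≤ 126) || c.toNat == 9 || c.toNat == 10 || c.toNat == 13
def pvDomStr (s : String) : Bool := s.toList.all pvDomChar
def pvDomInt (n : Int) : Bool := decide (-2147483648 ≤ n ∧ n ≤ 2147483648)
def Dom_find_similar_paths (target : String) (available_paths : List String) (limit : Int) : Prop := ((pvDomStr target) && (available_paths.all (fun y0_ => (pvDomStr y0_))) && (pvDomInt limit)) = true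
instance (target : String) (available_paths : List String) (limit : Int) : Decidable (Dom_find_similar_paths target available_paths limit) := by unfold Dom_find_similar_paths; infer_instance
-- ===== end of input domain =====

-- B replaces A's collect-then-stable-sort with overlap-keyed buckets consumed from the
-- largest overlap down to 1 (a counting sort); same return value, similar cost (objective: alternative).

-- shared helper: set(s.lower().strip("/").split("/"))
def pvParts (s : String) : PySem.Set String :=
  PySem.Set.ofList ((PySem.Str.split? (PySem.Str.stripChars (PySem.Str.lower s) "/") "/").getD [])

-- ===== PORT A =====
def find_similar_paths (target : String) (available_paths : List String) (limit : Int) : List String :=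
  let target_parts := pvParts target
  let suggestions : List (Int × String) := available_paths.foldl (fun acc path =>
      let overlap := PySem.Set.len (PySem.Set.inter target_parts (pvParts path))
      if overlap > 0 then acc ++ [(overlap, path)] else acc) []
  let sortedS := PySem.List.sorted suggestions (fun x => x.1) true
  (PySem.List.slice sortedS none (some limit)).map (fun x => x.2)

-- ===== PORT B =====
def find_similar_paths_alt (target : String) (available_paths : List String) (limit : Int) : List String :=
  let target_parts := pvParts target
  let buckets : PySem.Dict Int (List String) := available_paths.foldl (fun d path =>
      let overlap := PySem.Set.len (PySem.Set.inter target_parts (pvParts path))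
      if overlap > 0 then d.modify overlap [] (fun l => l ++ [path]) else d) PySem.Dict.empty
  let result := (PySem.List.pyRange (PySem.Set.len target_parts) 0 (-1)).foldl
      (fun acc k => acc ++ buckets.getD k []) []
  PySem.List.slice result none (some limit)

-- ===== PRECONDITION & SPEC =====
def Spec_find_similar_paths (target : String) (available_paths : List String) (limit : Int) (out : List String) : Prop := out = find_similar_paths_alt target available_paths limit
instance (target : String) (available_paths : List String) (limit : Int) (out : List String) : Decidable (Spec_find_similar_paths target available_paths limit out) := by unfold Spec_find_similar_paths; infer_instance

-- ===== CLAIM (what is proved, stated in full; the proofs are below) =====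
def Claim_equal_find_similar_paths : Prop := ∀ (target : String) (available_paths : List String) (limit : Int), Dom_find_similar_paths target available_paths limit → Spec_find_similar_paths target available_paths limit (find_similar_paths target available_paths limit)

-- ===== LEMMAS AND PROOFS =====

-- slice commutes with map (slice only looks at the length, which map preserves)
theorem pv_slice_map {α β : Type} (f : α → β) (l : List α) (a? b? : Option Int) :
    PySem.List.slice (l.map f) a? b? = (PySem.List.slice l a? b?).map f := by
  simp [PySem.List.slice]

-- range(n, 0, -1) is [n, n-1, …, 1]
theorem pv_pyRange_desc (n : Int) :
    PySem.List.pyRange n 0 (-1) = (List.range n.toNat).map (fun k : Nat => n - (k : Int)) := by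
  unfold PySem.List.pyRange
  rw [if_neg (by norm_num : ¬ ((-1 : Int) = 0))]
  rw [if_neg (by norm_num : ¬ ((0 : Int) < -1))]
  by_cases h : (0 : Int) < n
  · rw [if_pos h]
    have hc : (n - 0 + -(-1) - 1) / -(-1 : Int) = n := by norm_num
    rw [hc]
    apply List.map_congr_left
    intro k _
    ring
  · rw [if_neg h]
    have : n.toNat = 0 := by omega
    simp [this]

theorem pv_mem_pyRange_desc (n k : Int) :
    k ∈ PySem.List.pyRange n 0 (-1) ↔ 0 < k ∧ k ≤ n := by
  rw [pv_pyRange_desc]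
  constructor
  · intro h
    obtain ⟨i, hi, rfl⟩ := List.mem_map.mp h
    have := List.mem_range.mp hi
    omega
  · rintro ⟨h1, h2⟩
    exact List.mem_map.mpr ⟨(n - k).toNat, List.mem_range.mpr (by omega), by omega⟩

theorem pv_pairwise_pyRange_desc (n : Int) :
    (PySem.List.pyRange n 0 (-1)).Pairwise (fun a b => b < a) := by
  rw [pv_pyRange_desc]
  exact List.Pairwise.map _ (fun a b h => by omega) List.pairwise_lt_range

theorem pv_flatMap_congr {α β : Type} (l : List α) (f g : α → List β)
    (h : ∀ x ∈ l, f x = g x) : l.flatMap f = l.flatMap g := by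
  induction l with
  | nil => rfl
  | cons x xs ih =>
    simp only [List.flatMap_cons, h x (List.mem_cons_self), ih (fun y hy => h y (List.mem_cons_of_mem _ hy))]

theorem pv_insertBy_append_left {α : Type} (b : α → α → Bool) (x : α) (ys zs : List α)
    (h : ∀ y ∈ ys, b x y = false) :
    PySem.List.insertBy b x (ys ++ zs) = ys ++ PySem.List.insertBy b x zs := by
  induction ys with
  | nil => rfl
  | cons y ys ih =>
    simp only [List.cons_append, PySem.List.insertBy, h y (List.mem_cons_self)]
    simp [ih (fun y' hy' => h y' (List.mem_cons_of_mem _ hy'))]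

theorem pv_insertBy_eq_cons {α : Type} (b : α → α → Bool) (x : α) (zs : List α)
    (h : ∀ z ∈ zs, b x z = true) :
    PySem.List.insertBy b x zs = x :: zs := by
  cases zs with
  | nil => rfl
  | cons z zs => simp [PySem.List.insertBy, h z (List.mem_cons_self)]

-- inserting one element into a descending-bucket concatenation lands at the end of its bucket
theorem pv_insertBy_flatMap (ks : List Int) (g : Int → List (Int × String)) (x : Int × String)
    (hks : ks.Pairwise (fun a b => b < a))
    (hg : ∀ k ∈ ks, ∀ q ∈ g k, q.1 = k)
    (hx : x.1 ∈ ks) :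
    PySem.List.insertBy (fun a b => decide (b.1 < a.1)) x (ks.flatMap g)
      = ks.flatMap (fun k => if x.1 == k then g k ++ [x] else g k) := by
  induction ks with
  | nil => cases hx
  | cons k ks ih =>
    have hhead : ∀ k' ∈ ks, k' < k := fun k' hk' => (List.pairwise_cons.mp hks).1 k' hk'
    have htail := (List.pairwise_cons.mp hks).2
    simp only [List.flatMap_cons]
    by_cases hxk : x.1 = k
    · -- x belongs in the head bucket: it passes g k and lands in front of everything smaller
      have h1 : ∀ y ∈ g k, (decide (y.1 < x.1)) = false := by
        intro y hy
        have := hg k (List.mem_cons_self) y hy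
        simp [this, hxk]
      have h2 : ∀ z ∈ ks.flatMap g, (decide (z.1 < x.1)) = true := by
        intro z hz
        obtain ⟨k', hk', hz'⟩ := List.mem_flatMap.mp hz
        have := hg k' (List.mem_cons_of_mem _ hk') z hz'
        have := hhead k' hk'
        simp; omega
      rw [pv_insertBy_append_left _ _ _ _ h1, pv_insertBy_eq_cons _ _ _ h2]
      have h3 : ks.flatMap (fun k' => if x.1 == k' then g k' ++ [x] else g k') = ks.flatMap g := by
        apply pv_flatMap_congr
        intro k' hk'
        have : x.1 ≠ k' := by have := hhead k' hk'; omega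
        simp [this]
      rw [h3]
      simp [hxk]
    · -- x belongs further down: it passes the whole head bucket
      have hx' : x.1 ∈ ks := by
        rcases List.mem_cons.mp hx with h | h
        · exact absurd h hxk
        · exact h
      have h1 : ∀ y ∈ g k, (decide (y.1 < x.1)) = false := by
        intro y hy
        have hy1 := hg k (List.mem_cons_self) y hy
        have : x.1 < k := hhead x.1 hx'
        simp [hy1]; omega
      rw [pv_insertBy_append_left _ _ _ _ h1,
        ih htail (fun k' hk' => hg k' (List.mem_cons_of_mem _ hk')) hx']
      have : x.1 ≠ k := hxk
      simp [this]

-- stable descending sort by an Int key = concatenation of the key-buckets, largest key first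
theorem pv_sort_buckets (L : List (Int × String)) (ks : List Int)
    (hks : ks.Pairwise (fun a b => b < a))
    (hmem : ∀ q ∈ L, q.1 ∈ ks) :
    PySem.List.sorted L (fun q => q.1) true
      = ks.flatMap (fun k => L.filter (fun q => q.1 == k)) := by
  induction L using List.reverseRecOn with
  | nil => simp [PySem.List.sorted]
  | append_singleton L x ih =>
    rw [PySem.List.sorted_rev_eq_foldl_insertBy, List.foldl_append]
    simp only [List.foldl_cons, List.foldl_nil]
    rw [← PySem.List.sorted_rev_eq_foldl_insertBy]
    rw [ih (fun q hq => hmem q (List.mem_append_left _ hq))]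
    rw [pv_insertBy_flatMap ks _ x hks
      (fun k _ q hq => by simpa using (List.mem_filter.mp hq).2)
      (hmem x (List.mem_append_right _ (List.mem_cons_self)))]
    apply pv_flatMap_congr
    intro k _
    by_cases h : x.1 = k <;> simp [List.filter_append, h]

-- the overlap never exceeds the number of target parts
theorem pv_overlap_le (tp pp : PySem.Set String) :
    PySem.Set.len (PySem.Set.inter tp pp) ≤ PySem.Set.len tp := by
  simp only [PySem.Set.len, PySem.Set.inter, Nat.cast_le]
  exact List.length_filter_le _ _

-- A's guarded collect loop builds the mapped filter
theorem pv_A_fold (ov : String → Int) (paths : List String) (init : List (Int × String)) :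
    paths.foldl (fun acc path => if ov path > 0 then acc ++ [(ov path, path)] else acc) init
      = init ++ (paths.filter (fun path => decide (ov path > 0))).map (fun path => (ov path, path)) := by
  induction paths generalizing init with
  | nil => simp
  | cons x xs ih =>
    by_cases h : ov x > 0 <;> simp [h, ih]

-- B's guarded bucket loop is the pair fold over the same mapped filter
theorem pv_B_fold (ov : String → Int) (paths : List String) (d : PySem.Dict Int (List String)) :
    paths.foldl (fun d path =>
        if ov path > 0 then d.modify (ov path) [] (fun l => l ++ [path]) else d) d
      = ((paths.filter (fun path => decide (ov path > 0))).map (fun path => (ov path, path))).foldl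
          (fun d q => d.modify q.1 [] (fun l => l ++ [q.2])) d := by
  induction paths generalizing d with
  | nil => rfl
  | cons x xs ih =>
    by_cases h : ov x > 0 <;> simp [h, ih]

-- the whole equivalence, generalized over the overlap function and its bound
theorem pv_main (ov : String → Int) (n : Int) (hn : ∀ path, ov path ≤ n)
    (paths : List String) (limit : Int) :
    (PySem.List.slice (PySem.List.sorted (paths.foldl (fun acc path =>
        if ov path > 0 then acc ++ [(ov path, path)] else acc) [])
        (fun x => x.1) true) none (some limit)).map (fun x => x.2)
    = PySem.List.slice ((PySem.List.pyRange n 0 (-1)).foldl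
        (fun acc k => acc ++ (paths.foldl (fun d path =>
          if ov path > 0 then d.modify (ov path) [] (fun l => l ++ [path]) else d)
          PySem.Dict.empty).getD k []) []) none (some limit) := by
  rw [pv_A_fold, pv_B_fold]
  simp only [List.nil_append]
  set L : List (Int × String) :=
    (paths.filter (fun path => decide (ov path > 0))).map (fun path => (ov path, path)) with hL
  set ks := PySem.List.pyRange n 0 (-1) with hks
  have hmemks : ∀ q ∈ L, q.1 ∈ ks := by
    intro q hq
    rw [hL] at hq
    obtain ⟨path, hpath, rfl⟩ := List.mem_map.mp hq
    have hp' := (List.mem_filter.mp hpath).2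
    rw [hks, pv_mem_pyRange_desc]
    exact ⟨by simpa using hp', hn path⟩
  have hbucket : ∀ k : Int,
      (L.foldl (fun d q => d.modify q.1 [] (fun l => l ++ [q.2])) PySem.Dict.empty).getD k []
        = (L.filter (fun q => q.1 == k)).map (fun q => q.2) := by
    intro k
    rw [PySem.Dict.getD_foldl_modify_append]
    simp
  simp only [hbucket]
  rw [PySem.List.foldl_append_eq_flatMap (fun k => (L.filter (fun q => q.1 == k)).map (fun q => q.2))]
  simp only [List.nil_append]
  rw [pv_sort_buckets L ks (by rw [hks]; exact pv_pairwise_pyRange_desc n) hmemks]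
  rw [← pv_slice_map]
  simp [List.map_flatMap]

-- ===== VERDICT (by name: the statement is the Claim_ definition above) =====
theorem find_similar_paths_spec : Claim_equal_find_similar_paths := by
  intro target available_paths limit _
  unfold Spec_find_similar_paths find_similar_paths find_similar_paths_alt
  exact pv_main
    (fun path => PySem.Set.len (PySem.Set.inter (pvParts target) (pvParts path)))
    (PySem.Set.len (pvParts target))
    (fun path => pv_overlap_le _ _)
    available_paths limit
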